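-- pv_equiv track=rewrite | github.com/Mart1n66/school | python/fundamentals/matice.8.py | F
-- ===== SOURCE A (Python) =====
-- def F(A):
--     sucet_max = 0
--     index = 0
--     for j in range(len(A[0])):
--         sucet = 0
--         for i in range(len(A)):
--             sucet += A[i][j]
--         if sucet > sucet_max:
--             sucet_max = sucet
--             index = j
--     return index
-- ===== SOURCE B (Python) =====
-- def F(A):
--     n = len(A[0])
--     sums = [0] * n
--     for row in A:
--         sums = [s + v for s, v in zip(sums, row)]
--     best = max(sums, default=0)
--     return sums.index(best) if best > 0 else 0
-- ===== Notes on version B (the rewrite author's own statement) =====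
-- stated objective: alternative
-- what changed: Replaces A's fused column-rescan-with-running-strict-argmax loop by three staged library-style passes: fold rows into a column-sum table via zip/list-comprehension, take max(sums, default=0), and return sums.index(best) when positive, else 0.
import Mathlib
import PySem

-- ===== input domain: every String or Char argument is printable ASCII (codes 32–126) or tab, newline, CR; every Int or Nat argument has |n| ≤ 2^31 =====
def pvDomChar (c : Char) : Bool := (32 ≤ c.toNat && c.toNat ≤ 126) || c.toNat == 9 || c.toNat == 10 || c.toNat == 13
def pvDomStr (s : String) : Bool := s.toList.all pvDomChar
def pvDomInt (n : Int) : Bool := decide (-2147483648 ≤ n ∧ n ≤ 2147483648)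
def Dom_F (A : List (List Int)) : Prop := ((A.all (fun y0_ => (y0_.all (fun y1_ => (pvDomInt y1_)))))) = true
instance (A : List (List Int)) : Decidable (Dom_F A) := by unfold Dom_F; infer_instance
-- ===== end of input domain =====

-- B stages the work: zip-based functional fold building the column-sum table, then
-- library max with default 0, then a first-occurrence index lookup (alternative decomposition).

-- ===== PORT A =====
def F (A : List (List Int)) : Int :=
  let r := (PySem.List.pyRange 0 ((PySem.List.pyGetD A 0 []).length : Int) 1).foldl
    (fun (st : Int × Int) j =>
      let sucet := (PySem.List.pyRange 0 (A.length : Int) 1).foldl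
        (fun s i => s + PySem.List.pyGetD (PySem.List.pyGetD A i []) j 0) 0
      if sucet > st.1 then (sucet, j) else st) ((0 : Int), (0 : Int))
  r.2

-- ===== PORT B =====
def F_alt (A : List (List Int)) : Int :=
  let n := (PySem.List.pyGetD A 0 []).length
  let sums := A.foldl (fun s row => (s.zip row).map (fun p => p.1 + p.2)) (List.replicate n 0)
  let best := match PySem.List.max? sums (fun x => x) with
    | none => (0 : Int)
    | some m => m
  if best > 0 then
    match PySem.List.index? sums best with
    | some i => (i : Int)
    | none => 0   -- unreachable: best ∈ sums whenever best > 0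
  else 0

-- ===== PRECONDITION & SPEC =====
-- Pre_ excludes exactly the inputs where Python A raises IndexError: empty A (A[0]) and
-- ragged inputs where some row is shorter than the first row (A[i][j] out of range).
def Pre_F (A : List (List Int)) : Prop := A ≠ [] ∧ ∀ row ∈ A, A.headI.length ≤ row.length
instance (A : List (List Int)) : Decidable (Pre_F A) := by unfold Pre_F; infer_instance
def pvWitness_F : List (List Int) := [[1, -2], [3, 4]]
def Spec_F (A : List (List Int)) (out : Int) : Prop := out = F_alt A
instance (A : List (List Int)) (out : Int) : Decidable (Spec_F A out) := by unfold Spec_F; infer_instance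

-- ===== CLAIM (what is proved, stated in full; the proofs are below) =====
def Claim_equal_F : Prop := ∀ (A : List (List Int)), Dom_F A → Pre_F A → Spec_F A (F A)

-- ===== LEMMAS AND PROOFS =====

-- running max over a foldl distributes over the initial max
theorem pv_foldl_max_max (t : List Int) (a b : Int) :
    t.foldl max (max a b) = max a (t.foldl max b) := by
  induction t generalizing b with
  | nil => simp
  | cons x t ih => simp only [List.foldl_cons, max_assoc]; exact ih (max b x)

-- B's table after one row: length preserved, entries add row[k]
theorem pv_zipRow (s row : List Int) (h : s.length ≤ row.length) :
    ((s.zip row).map (fun p => p.1 + p.2)).length = s.length ∧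
    ∀ k, k < s.length →
      ((s.zip row).map (fun p => p.1 + p.2)).getD k 0 = s.getD k 0 + row.getD k 0 := by
  constructor
  · simp [List.length_zip]; omega
  · intro k hk
    have hk2 : k < row.length := lt_of_lt_of_le hk h
    have hz : k < (s.zip row).length := by simp [List.length_zip]; omega
    rw [List.getD_eq_getElem _ _ (by simpa using hz), List.getD_eq_getElem _ _ hk,
      List.getD_eq_getElem _ _ hk2]
    simp [List.getElem_zip]

-- B's full table
theorem pv_sumsFold (A : List (List Int)) (n : Nat) (hrows : ∀ row ∈ A, n ≤ row.length) :
    ∀ s : List Int, s.length = n →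
    (A.foldl (fun s row => (s.zip row).map (fun p => p.1 + p.2)) s).length = n ∧
    ∀ k (hk : k < n),
      (A.foldl (fun s row => (s.zip row).map (fun p => p.1 + p.2)) s).getD k 0
        = s.getD k 0 + (A.map (fun row => PySem.List.pyGetD row (k : Int) 0)).sum := by
  induction A with
  | nil => intro s hs; simpa using hs
  | cons row rest ih =>
    intro s hs
    have hrow : n ≤ row.length := hrows row (by simp)
    obtain ⟨h1, h2⟩ := pv_zipRow s row (by omega)
    obtain ⟨h3, h4⟩ := ih (fun r hr => hrows r (by simp [hr]))
      ((s.zip row).map (fun p => p.1 + p.2)) (by omega)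
    refine ⟨by simpa using h3, ?_⟩
    intro k hk
    simp only [List.foldl_cons]
    rw [h4 k hk, h2 k (by omega)]
    have : PySem.List.pyGetD row (k : Int) 0 = row.getD k 0 := PySem.List.pyGetD_natCast ..
    simp [add_assoc]

-- A's argmax loop over a pure list l, characterised: invariant over prefixes
theorem pv_argmaxInv (l : List Int) (m : Nat) (hm : m ≤ l.length) :
    let st := (PySem.List.pyRange 0 (m : Int) 1).foldl
      (fun (st : Int × Int) j =>
        if PySem.List.pyGetD l j 0 > st.1 then (PySem.List.pyGetD l j 0, j) else st)
      ((0 : Int), (0 : Int))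
    st.1 = (l.take m).foldl max 0 ∧
    (st.1 = 0 → st.2 = 0) ∧
    (0 < st.1 → ∃ k : Nat, st.2 = (k : Int) ∧ PySem.List.index? (l.take m) st.1 = some k) := by
  induction m with
  | zero =>
    rw [show ((0 : Nat) : Int) = 0 by rfl, PySem.List.pyRange_one_eq_nil le_rfl]
    simp
  | succ m ih =>
    obtain ⟨h1, h2, h3⟩ := ih (Nat.le_of_succ_le hm)
    have hcast : ((m + 1 : Nat) : Int) = (m : Int) + 1 := by push_cast; ring
    rw [hcast, PySem.List.pyRange_one_succ_right (by positivity), List.foldl_append]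
    simp only [List.foldl_cons, List.foldl_nil]
    set st := (PySem.List.pyRange 0 (m : Int) 1).foldl
      (fun (st : Int × Int) j =>
        if PySem.List.pyGetD l j 0 > st.1 then (PySem.List.pyGetD l j 0, j) else st)
      ((0 : Int), (0 : Int)) with hst
    have hmlt : m < l.length := by omega
    have hv : PySem.List.pyGetD l (m : Int) 0 = l[m] := by
      rw [PySem.List.pyGetD_natCast, List.getD_eq_getElem _ _ hmlt]
    have htake : l.take (m + 1) = l.take m ++ [l[m]] := List.take_succ_eq_append_getElem hmlt
    have hnn : 0 ≤ (l.take m).foldl max 0 := (PySem.List.le_foldl_max (l.take m) 0).1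
    have hmax : ∀ y ∈ l.take m, y ≤ (l.take m).foldl max 0 :=
      (PySem.List.le_foldl_max (l.take m) 0).2
    rw [htake, List.foldl_append]
    simp only [List.foldl_cons, List.foldl_nil]
    by_cases hgt : l[m] > st.1
    · rw [if_pos (by rw [hv]; exact hgt)]
      refine ⟨?_, ?_, ?_⟩
      · simp only [hv]; omega
      · intro h0; exfalso; rw [h1] at hgt; simp only [hv] at h0; omega
      · intro _
        refine ⟨m, by simp, ?_⟩
        have hnotmem : l[m] ∉ l.take m := by
          intro hmem
          have := hmax _ hmem
          rw [h1] at hgt; omega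
        simp only [hv]
        rw [PySem.List.index?_append_singleton_self _ _ hnotmem, List.length_take]
        congr 1; omega
    · rw [if_neg (by rw [hv]; exact hgt)]
      refine ⟨?_, h2, ?_⟩
      · rw [h1] at hgt ⊢; omega
      · intro hpos
        obtain ⟨k, hk1, hk2⟩ := h3 hpos
        refine ⟨k, hk1, ?_⟩
        have hmem : st.1 ∈ l.take m := by
          have := PySem.List.index?_isSome_iff (xs := l.take m) (v := st.1)
          rw [hk2] at this; simpa using this.mp rfl
        rw [PySem.List.index?_append_of_mem _ hmem]; exact hk2

-- B's selection (max + index) equals A's running strict argmax, on a pure list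
theorem pv_select (l : List Int) :
    ((PySem.List.pyRange 0 (l.length : Int) 1).foldl
      (fun (st : Int × Int) j =>
        if PySem.List.pyGetD l j 0 > st.1 then (PySem.List.pyGetD l j 0, j) else st)
      ((0 : Int), (0 : Int))).2
    = (let best := match PySem.List.max? l (fun x => x) with
        | none => (0 : Int)
        | some m => m
       if best > 0 then
         match PySem.List.index? l best with
         | some i => (i : Int)
         | none => 0
       else 0) := by
  obtain ⟨i1, i2, i3⟩ := pv_argmaxInv l l.length le_rfl
  simp only [List.take_length] at i1 i3
  set st := (PySem.List.pyRange 0 (l.length : Int) 1).foldl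
    (fun (st : Int × Int) j =>
      if PySem.List.pyGetD l j 0 > st.1 then (PySem.List.pyGetD l j 0, j) else st)
    ((0 : Int), (0 : Int)) with hstdef
  cases l with
  | nil => simp [PySem.List.max?] at i1 i2 ⊢; exact i2 i1
  | cons x t =>
    rw [PySem.List.max?_id_cons]
    simp only []
    have hfold : (x :: t).foldl max 0 = max 0 (t.foldl max x) := by
      simp only [List.foldl_cons]
      exact pv_foldl_max_max t 0 x
    by_cases hpos : t.foldl max x > 0
    · rw [if_pos hpos]
      have h1 : st.1 = t.foldl max x := by rw [i1, hfold]; omega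
      obtain ⟨k, hk1, hk2⟩ := i3 (by rw [h1]; exact hpos)
      rw [h1] at hk2
      rw [hk2, hk1]
    · rw [if_neg hpos]
      apply i2
      rw [i1, hfold]; omega

-- ===== VERDICT (by name: the statement is the Claim_ definition above) =====
theorem F_spec : Claim_equal_F := by
  intro A _hdom hpre
  obtain ⟨hne, hrows⟩ := hpre
  unfold Spec_F F F_alt
  simp only []
  have hhead : PySem.List.pyGetD A 0 [] = A.headI := by
    cases A with
    | nil => exact absurd rfl hne
    | cons r t => simp [PySem.List.pyGetD]
  generalize hn : (PySem.List.pyGetD A 0 []).length = n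
  have hrows' : ∀ row ∈ A, n ≤ row.length := by
    intro row hr; rw [← hn, hhead]; exact hrows row hr
  obtain ⟨hlen, htab⟩ := pv_sumsFold A n hrows' (List.replicate n 0) (by simp)
  generalize hL : A.foldl (fun s row => (s.zip row).map (fun p => p.1 + p.2))
    (List.replicate n 0) = L at hlen htab ⊢
  have hentry : ∀ k : Nat, k < n →
      L.getD k 0 = (A.map (fun row => PySem.List.pyGetD row (k : Int) 0)).sum := by
    intro k hk
    rw [htab k hk, List.getD_replicate 0 hk, zero_add]
  have hfun : ∀ (st : Int × Int), ∀ j ∈ PySem.List.pyRange 0 (n : Int) 1,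
      (let sucet := (PySem.List.pyRange 0 (A.length : Int) 1).foldl
          (fun s i => s + PySem.List.pyGetD (PySem.List.pyGetD A i []) j 0) 0
       if sucet > st.1 then (sucet, j) else st)
      = (if PySem.List.pyGetD L j 0 > st.1 then (PySem.List.pyGetD L j 0, j) else st) := by
    intro st j hj
    obtain ⟨hj0, hjn⟩ := PySem.List.mem_pyRange_one.mp hj
    obtain ⟨k, rfl⟩ : ∃ k : Nat, j = (k : Int) := ⟨j.toNat, (Int.toNat_of_nonneg hj0).symm⟩
    have hk : k < n := by exact_mod_cast hjn
    have hcol : (PySem.List.pyRange 0 (A.length : Int) 1).foldl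
        (fun s i => s + PySem.List.pyGetD (PySem.List.pyGetD A i []) (k : Int) 0) 0
        = (A.map (fun row => PySem.List.pyGetD row (k : Int) 0)).sum := by
      rw [PySem.List.foldl_pyRange_zero_pyGetD' A [] (fun s row => s + PySem.List.pyGetD row (k : Int) 0) 0,
        PySem.List.foldl_add, zero_add]
    have hsk : PySem.List.pyGetD L (k : Int) 0 = L.getD k 0 := PySem.List.pyGetD_natCast ..
    simp only [hcol, hsk, hentry k hk]
  rw [PySem.List.foldl_congr_mem _ _ _ _ hfun,
    show ((n : Int)) = (L.length : Int) by rw [hlen]]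
  exact pv_select L
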